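-- pv_equiv track=rewrite | github.com/lambergluke/advent-2025 | Day3/day3part2.py | find_joltage
-- ===== SOURCE A (Python) =====
-- def find_joltage(str_n):
--     chars = list(str_n)
--     to_remove = len(chars) - 12
--     i = 0
--     while to_remove > 0 and i < len(chars):
--         # We remove if: there's a larger digit within the next 'to_remove' positions
--         if i < len(chars) - 1:  # Not at the end
--             # Look ahead at most 'to_remove' positions (we need at least that many to potentially swap)
--             lookahead = chars[i+1:min(i+1+to_remove, len(chars))]
--             if lookahead and chars[i] < max(lookahead):
--                 chars.pop(i)
--                 to_remove -= 1
--                 # This bug was a tough find: Don't increment i because we need to recheck this position with new char. Its like we move it to us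
--                 # instead of us moving to it
--             else:
--                 i += 1
--         else:
--             i += 1
--
--     # Remove from end if needed
--     while to_remove > 0:
--         chars.pop()
--         to_remove -= 1
--
--     return ''.join(chars)
-- ===== SOURCE B (Python) =====
-- def find_joltage(str_n):
--     # Selection greedy: pick each of the 12 kept characters directly as the
--     # maximum of the window that still leaves enough characters for the rest.
--     if len(str_n) <= 12:
--         return str_n
--     return _pick(str_n, 12)
--
-- def _pick(s, k):
--     if k == 0:
--         return ''
--     window = s[:len(s) - k + 1]
--     m = max(window)
--     j = s.index(m)
--     return m + _pick(s[j + 1:], k - 1)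
-- ===== Notes on version B (the rewrite author's own statement) =====
-- stated objective: faster
-- what changed: A repeatedly rescans and mutates the list (pop(i) plus a max over a lookahead window per step, re-checking positions) to delete n-12 characters; B instead selects the 12 kept characters directly by the classic selection greedy: each next character is the maximum of the window that still leaves enough characters for the remaining picks.
import Mathlib
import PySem

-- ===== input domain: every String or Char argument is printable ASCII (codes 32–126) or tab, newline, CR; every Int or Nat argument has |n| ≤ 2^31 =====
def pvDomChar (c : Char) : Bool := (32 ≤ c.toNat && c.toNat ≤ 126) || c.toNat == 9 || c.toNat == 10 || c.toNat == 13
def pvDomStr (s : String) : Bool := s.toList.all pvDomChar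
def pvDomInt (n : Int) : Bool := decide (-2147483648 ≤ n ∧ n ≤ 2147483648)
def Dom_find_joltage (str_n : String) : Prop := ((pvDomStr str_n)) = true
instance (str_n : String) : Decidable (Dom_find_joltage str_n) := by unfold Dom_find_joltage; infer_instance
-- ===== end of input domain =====

-- B replaces A's quadratic delete-by-delete scan with the linear selection greedy that picks the 12 kept characters directly (objective: faster; measured asymptotically faster).

-- ===== PORT A =====
-- the main while loop of A: state (chars, to_remove, i)
def findLoopA (chars : List Char) (r : Int) (i : Nat) : List Char × Int :=
  if h : 0 < r ∧ i < chars.length then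
    if i < chars.length - 1 then
      -- lookahead = chars[i+1:min(i+1+to_remove, len(chars))]
      let lookahead := PySem.List.slice chars (some ((i : Int) + 1)) (some (min ((i : Int) + 1 + r) (chars.length : Int)))
      -- "lookahead and chars[i] < max(lookahead)"
      let cond : Bool := !lookahead.isEmpty &&
        (match PySem.List.pyGet? chars (i : Int), PySem.List.max? lookahead (fun c => c) with
         | some c, some m => decide (c < m)
         | _, _ => false)
      if cond then
        match PySem.List.pop? chars (i : Int) with
        | some p => findLoopA p.2 (r - 1) i
        | none => (chars, r)      -- unreachable: i is in range
      else findLoopA chars r (i + 1)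
    else findLoopA chars r (i + 1)
  else (chars, r)
termination_by (r.toNat, chars.length - i)
decreasing_by
  · left; omega
  · right; omega
  · right; omega

-- the trailing "while to_remove > 0: chars.pop()" loop of A
def popEndLoop (chars : List Char) (r : Int) : List Char :=
  if 0 < r then
    match PySem.List.pop? chars with
    | some p => popEndLoop p.2 (r - 1)
    | none => chars               -- unreachable: the list is never exhausted here
  else chars
termination_by r.toNat
decreasing_by omega

def find_joltage (str_n : String) : String :=
  let chars := str_n.toList
  let p := findLoopA chars ((chars.length : Int) - 12) 0
  String.ofList (popEndLoop p.1 p.2)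

-- ===== PORT B =====
-- _pick(s, k): the k-character pick by selection greedy
def pickChars (s : List Char) (k : Nat) : List Char :=
  match k with
  | 0 => []
  | Nat.succ k' =>
    -- window = s[:len(s) - k + 1]
    match PySem.List.max? (PySem.List.slice s none (some ((s.length : Int) - ((k' : Int) + 1) + 1))) (fun c => c) with
    | none => []                  -- unreachable: max() raises on empty; B never calls it so
    | some m =>
      match PySem.List.index? s m with
      | none => []                -- unreachable: m is an element of s
      | some j => m :: pickChars (PySem.List.slice s (some ((j : Int) + 1)) none) k'

def find_joltage_alt (str_n : String) : String :=
  if PySem.Str.len str_n ≤ 12 then str_n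
  else String.ofList (pickChars str_n.toList 12)

-- ===== PRECONDITION & SPEC =====
def Spec_find_joltage (str_n : String) (out : String) : Prop := out = find_joltage_alt str_n
instance (str_n : String) (out : String) : Decidable (Spec_find_joltage str_n out) := by unfold Spec_find_joltage; infer_instance

-- ===== CLAIM (what is proved, stated in full; the proofs are below) =====
def Claim_equal_find_joltage : Prop := ∀ (str_n : String), Dom_find_joltage str_n → Spec_find_joltage str_n (find_joltage str_n)

-- ===== LEMMAS AND PROOFS =====

-- pure model of A's main loop: fA rest r = (kept characters, leftover removals)
def fA : List Char → Nat → List Char × Nat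
  | s, 0 => (s, 0)
  | [], r => ([], r)
  | c :: cs, Nat.succ r =>
    match PySem.List.max? (cs.take (Nat.succ r)) (fun c => c) with
    | some m =>
      if c < m then fA cs r
      else let p := fA cs (Nat.succ r); (c :: p.1, p.2)
    | none => let p := fA cs (Nat.succ r); (c :: p.1, p.2)

lemma fA_zero (s : List Char) : fA s 0 = (s, 0) := by cases s <;> rfl

lemma fA_nil (r : Nat) : fA [] r = ([], r) := by cases r <;> rfl

lemma fA_singleton (c : Char) (ρ : Nat) : fA [c] (Nat.succ ρ) = ([c], Nat.succ ρ) := rfl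

lemma fA_cons_succ (c : Char) (cs : List Char) (ρ : Nat) :
    fA (c :: cs) (Nat.succ ρ) =
      match PySem.List.max? (cs.take (Nat.succ ρ)) (fun x => x) with
      | some m =>
        if c < m then fA cs ρ
        else (c :: (fA cs (Nat.succ ρ)).1, (fA cs (Nat.succ ρ)).2)
      | none => (c :: (fA cs (Nat.succ ρ)).1, (fA cs (Nat.succ ρ)).2) := rfl

lemma slice_from_succ {α : Type} (xs : List α) (j : Nat) :
    PySem.List.slice xs (some ((j : Int) + 1)) = xs.drop (j + 1) := by
  rw [show ((j : Int) + 1) = (((j + 1 : Nat) : Int)) by push_cast; ring, PySem.List.slice_from_natCast]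

lemma foldl_max_shift (t : List Char) : ∀ x y, List.foldl max (max x y) t = max x (List.foldl max y t) := by
  induction t with
  | nil => intro x y; rfl
  | cons a t ih => intro x y; simp only [List.foldl_cons, max_assoc]; exact ih x (max y a)

lemma foldl_max_of_le (t : List Char) : ∀ c, (∀ x ∈ t, x ≤ c) → List.foldl max c t = c := by
  induction t with
  | nil => intro c _; rfl
  | cons a t ih =>
    intro c h
    simp only [List.foldl_cons]
    rw [max_eq_left (h a (by simp))]
    exact ih c (fun x hx => h x (by simp [hx]))

lemma max?_cons_lt {c m : Char} {t : List Char} (ht : PySem.List.max? t (fun x => x) = some m)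
    (hc : c < m) : PySem.List.max? (c :: t) (fun x => x) = some m := by
  cases t with
  | nil => simp [PySem.List.max?] at ht
  | cons a t' =>
    rw [PySem.List.max?_id_cons] at ht ⊢
    simp only [List.foldl_cons]
    rw [foldl_max_shift]
    injection ht with ht
    rw [ht, max_eq_right hc.le]

lemma max?_cons_ge {c m : Char} {t : List Char} (ht : PySem.List.max? t (fun x => x) = some m)
    (hc : m ≤ c) : PySem.List.max? (c :: t) (fun x => x) = some c := by
  rw [PySem.List.max?_id_cons]
  rw [foldl_max_of_le]
  intro x hx
  exact le_trans (PySem.List.max?_isMax ht x hx) hc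

-- pickChars returns the whole list when asked for all of it
lemma pick_full : ∀ s : List Char, pickChars s s.length = s := by
  intro s
  induction s with
  | nil => rfl
  | cons c cs ih =>
    show pickChars (c :: cs) (Nat.succ cs.length) = c :: cs
    unfold pickChars
    have hb : ((c :: cs).length : Int) - ((cs.length : Int) + 1) + 1 = ((1 : Nat) : Int) := by
      simp only [List.length_cons]; push_cast; ring
    rw [hb, PySem.List.slice_to_natCast]
    have ht1 : List.take 1 (c :: cs) = [c] := rfl
    rw [ht1]
    have hm : PySem.List.max? [c] (fun x => x) = some c := by
      rw [PySem.List.max?_id_cons]; rfl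
    simp only [hm, PySem.List.index?_cons_self, slice_from_succ, List.drop_succ_cons,
      List.drop_zero]
    rw [ih]

-- key step: a head beaten inside the window does not change the pick
lemma pick_skip {c m : Char} (cs : List Char) (ρ : Nat) (hρ : ρ < cs.length)
    (hm : PySem.List.max? (cs.take (ρ + 1)) (fun x => x) = some m) (hc : c < m) :
    pickChars (c :: cs) (cs.length - ρ) = pickChars cs (cs.length - ρ) := by
  obtain ⟨k', hk'⟩ : ∃ k', cs.length - ρ = Nat.succ k' := ⟨cs.length - ρ - 1, by omega⟩
  rw [hk']
  unfold pickChars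
  have hbs : ((c :: cs).length : Int) - ((k' : Int) + 1) + 1 = ((ρ + 2 : Nat) : Int) := by
    simp only [List.length_cons]; push_cast; omega
  have hbc : ((cs).length : Int) - ((k' : Int) + 1) + 1 = ((ρ + 1 : Nat) : Int) := by
    push_cast; omega
  rw [hbs, hbc, PySem.List.slice_to_natCast, PySem.List.slice_to_natCast,
    show List.take (ρ + 2) (c :: cs) = c :: List.take (ρ + 1) cs from rfl]
  have hne : c ≠ m := fun h => absurd hc (by rw [h]; exact lt_irrefl m)
  obtain ⟨j, hj⟩ : ∃ j, PySem.List.index? cs m = some j := by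
    have hmem : m ∈ cs := List.mem_of_mem_take (PySem.List.max?_mem hm)
    rcases h : PySem.List.index? cs m with _ | j
    · rw [← PySem.List.index?_isSome_iff cs m, h] at hmem
      simp at hmem
    · exact ⟨j, rfl⟩
  simp only [max?_cons_lt hm hc, hm, PySem.List.index?_cons_of_ne cs hne, hj, Option.map_some,
    slice_from_succ, List.drop_succ_cons]

-- main invariant: lengths balance, and the kept prefix of fA is exactly pickChars
lemma fA_main : ∀ s : List Char, ∀ r : Nat,
    (fA s r).1.length + r = s.length + (fA s r).2 ∧
    (fA s r).1.take (s.length - r) = pickChars s (s.length - r) := by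
  intro s
  induction s with
  | nil =>
    intro r
    refine ⟨by rw [fA_nil], ?_⟩
    rw [fA_nil]
    simp [pickChars]
  | cons c cs ih =>
    intro r
    cases r with
    | zero =>
      refine ⟨by rw [fA_zero], ?_⟩
      rw [fA_zero]
      simpa using (pick_full (c :: cs)).symm
    | succ ρ =>
      rcases hmx : PySem.List.max? (cs.take (Nat.succ ρ)) (fun x => x) with _ | m
      · -- window empty: cs = []
        have hcs : cs = [] := by
          have h := (PySem.List.max?_eq_none_iff (cs.take (Nat.succ ρ)) (fun x => x)).mp hmx
          cases cs with
          | nil => rfl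
          | cons a t => simp [List.take_succ_cons] at h
        subst hcs
        refine ⟨by rw [fA_singleton], ?_⟩
        rw [fA_singleton]
        have h0 : (ρ + 1 : Nat) ≥ 1 := by omega
        have h1 : [c].length - Nat.succ ρ = 0 := by simp
        simp only [List.length_cons, List.length_nil] at h1 ⊢
        rw [show 0 + 1 - Nat.succ ρ = 0 by omega]
        rfl
      · by_cases hlt : c < m
        · -- branch 1: head is removed
          have heq : fA (c :: cs) (Nat.succ ρ) = fA cs ρ := by
            rw [fA_cons_succ, hmx]
            simp [hlt]
          obtain ⟨ihl, ihp⟩ := ih ρ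
          refine ⟨by rw [heq]; simp only [List.length_cons] at ihl ⊢; omega, ?_⟩
          rw [heq]
          have hlen : (c :: cs).length - Nat.succ ρ = cs.length - ρ := by
            simp only [List.length_cons]; omega
          rw [hlen]
          by_cases hρ : ρ < cs.length
          · rw [pick_skip cs ρ hρ hmx hlt, ihp]
          · rw [show cs.length - ρ = 0 by omega]
            simp [pickChars]
        · -- branch 2: head is kept
          have heq : fA (c :: cs) (Nat.succ ρ) =
              (c :: (fA cs (Nat.succ ρ)).1, (fA cs (Nat.succ ρ)).2) := by
            rw [fA_cons_succ, hmx]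
            simp [hlt]
          obtain ⟨ihl, ihp⟩ := ih (Nat.succ ρ)
          refine ⟨by rw [heq]; simp only [List.length_cons] at ihl ⊢; omega, ?_⟩
          rw [heq]
          by_cases hρ : ρ < cs.length
          · have hk : (c :: cs).length - Nat.succ ρ = Nat.succ (cs.length - Nat.succ ρ) := by
              simp only [List.length_cons]; omega
            rw [hk]
            rw [List.take_succ_cons]
            unfold pickChars
            have hbs' : ((c :: cs).length : Int) - (((cs.length - Nat.succ ρ : Nat) : Int) + 1) + 1
                = ((ρ + 2 : Nat) : Int) := by
              simp only [List.length_cons]; omega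
            rw [hbs', PySem.List.slice_to_natCast,
              show List.take (ρ + 2) (c :: cs) = c :: List.take (ρ + 1) cs from rfl]
            have hmax : PySem.List.max? (c :: List.take (ρ + 1) cs) (fun x => x) = some c :=
              max?_cons_ge hmx (le_of_not_gt hlt)
            simp only [hmax, PySem.List.index?_cons_self, slice_from_succ, List.drop_succ_cons,
              List.drop_zero]
            exact congrArg (c :: ·) ihp
          · have h0 : (c :: cs).length - Nat.succ ρ = 0 := by
              simp only [List.length_cons]; omega
            rw [h0]
            rfl

-- ---- A-side bridges ----

lemma eraseIdx_append_cons (pre cs : List Char) (c : Char) :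
    (pre ++ c :: cs).eraseIdx pre.length = pre ++ cs := by
  induction pre with
  | nil => rfl
  | cons a pre ih =>
    simp only [List.cons_append, List.length_cons, List.eraseIdx_cons_succ, ih]

lemma drop_length_append_cons (pre cs : List Char) (c : Char) :
    (pre ++ c :: cs).drop (pre.length + 1) = cs := by
  rw [show pre ++ c :: cs = (pre ++ [c]) ++ cs by simp,
    show pre.length + 1 = (pre ++ [c]).length by simp, List.drop_left]

-- the lookahead slice is a take of the remaining suffix
lemma lookahead_eq (pre cs : List Char) (c : Char) (r : Int) (hr : 0 < r) :
    PySem.List.slice (pre ++ c :: cs) (some ((pre.length : Int) + 1))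
      (some (min ((pre.length : Int) + 1 + r) (((pre ++ c :: cs).length : Int))))
    = cs.take r.toNat := by
  rw [PySem.List.slice_toNat _ (by omega) (by simp; omega)]
  rw [show ((pre.length : Int) + 1).toNat = pre.length + 1 by omega]
  rw [drop_length_append_cons]
  have hlen : ((pre ++ c :: cs).length : Int) = (pre.length : Int) + 1 + (cs.length : Int) := by
    simp; omega
  have harg : (min ((pre.length : Int) + 1 + r) (((pre ++ c :: cs).length : Int))).toNat
      - (pre.length + 1) = min r.toNat cs.length := by
    rw [hlen]; omega
  rw [harg, ← List.take_take, List.take_length]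

lemma loopA_bridge : ∀ (n : Nat) (rest pre : List Char) (r : Int), 0 ≤ r →
    r.toNat + rest.length ≤ n →
    findLoopA (pre ++ rest) r pre.length = (pre ++ (fA rest r.toNat).1, ((fA rest r.toNat).2 : Int)) := by
  intro n
  induction n with
  | zero =>
    intro rest pre r h0 hle
    have hr : r = 0 := by omega
    have hrest : rest = [] := by
      cases rest with
      | nil => rfl
      | cons a t => simp at hle
    subst hr; subst hrest
    rw [findLoopA]
    rw [dif_neg (by simp)]
    simp [fA_zero]
  | succ n ih =>
    intro rest pre r h0 hle
    by_cases hr0 : 0 < r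
    case neg =>
      have hr : r = 0 := by omega
      subst hr
      rw [findLoopA, dif_neg (by simp)]
      simp [fA_zero]
    case pos =>
    rcases rest with _ | ⟨c, cs⟩
    · rw [findLoopA, dif_neg (by simp), fA_nil]
      simp [Int.toNat_of_nonneg h0]
    · obtain ⟨ρ, hρ⟩ : ∃ ρ, r.toNat = Nat.succ ρ := ⟨r.toNat - 1, by omega⟩
      have hguard : 0 < r ∧ pre.length < (pre ++ c :: cs).length := ⟨hr0, by simp⟩
      rw [findLoopA, dif_pos hguard]
      rcases cs with _ | ⟨a, t⟩
      · -- at the last position: i += 1, then the loop ends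
        rw [if_neg (by simp)]
        have hih := ih [] (pre ++ [c]) r h0
          (by simp only [List.length_cons, List.length_nil] at hle ⊢; omega)
        simp only [List.append_nil, List.length_append, List.length_cons, List.length_nil,
          Nat.zero_add, fA_nil] at hih
        rw [hih, hρ, fA_singleton]
      · rw [if_pos (by simp)]
        rw [lookahead_eq pre (a :: t) c r hr0]
        rw [PySem.List.pyGet?_append_length]
        rw [hρ, List.take_succ_cons]
        rcases hm : PySem.List.max? (a :: List.take ρ t) (fun x => x) with _ | m
        · exact absurd hm (by simp [PySem.List.max?_eq_none_iff])
        by_cases hclt : c < m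
        · -- pop branch
          simp only [hm, List.isEmpty_cons, Bool.not_false, Bool.true_and, decide_eq_true hclt,
            if_true]
          rw [PySem.List.pop?_natCast _ _ hguard.2]
          simp only [eraseIdx_append_cons]
          rw [ih (a :: t) pre (r - 1) (by omega)
            (by simp only [List.length_cons] at hle ⊢; omega)]
          rw [fA_cons_succ, List.take_succ_cons]
          rw [show (r - 1).toNat = ρ by omega]
          simp [hm, hclt]
        · -- keep branch: i += 1
          simp only [hm, List.isEmpty_cons, Bool.not_false, Bool.true_and,
            decide_eq_false hclt, if_false]
          have hih := ih (a :: t) (pre ++ [c]) r h0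
            (by simp only [List.length_cons] at hle ⊢; omega)
          simp only [List.length_append, List.length_cons, List.length_nil, Nat.zero_add,
            List.append_assoc, List.singleton_append] at hih
          rw [hih, hρ, fA_cons_succ c (a :: t) ρ, List.take_succ_cons]
          simp [hm, hclt]
  termination_by n => n

lemma take_append_single (xs : List Char) (x : Char) (n : Nat) (hn : n ≤ xs.length) :
    (xs ++ [x]).take n = xs.take n := by
  rw [← List.take_left (l₁ := xs) (l₂ := [x]), List.take_take, min_eq_left hn,
    List.take_left]

lemma popEnd_eq : ∀ (n : Nat) (r : Int), r.toNat ≤ n → ∀ c : List Char,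
    popEndLoop c r = c.take (c.length - r.toNat) := by
  intro n
  induction n with
  | zero =>
    intro r hr c
    rw [popEndLoop, if_neg (by omega)]
    rw [show r.toNat = 0 by omega, Nat.sub_zero, List.take_length]
  | succ n ih =>
    intro r hr c
    by_cases h0 : 0 < r
    · rcases List.eq_nil_or_concat c with hnil | ⟨xs, x, hx⟩
      · subst hnil
        rw [popEndLoop, if_pos h0]
        have hp : PySem.List.pop? ([] : List Char) = none := rfl
        simp only [hp, List.take_nil]
      · subst hx
        simp only [List.concat_eq_append]
        rw [popEndLoop, if_pos h0]
        simp only [PySem.List.pop?_last]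
        rw [ih (r - 1) (by omega) xs]
        rw [take_append_single xs x _ (by simp; omega)]
        congr 1
        simp; omega
    · rw [popEndLoop, if_neg h0]
      rw [show r.toNat = 0 by omega, Nat.sub_zero, List.take_length]

-- ===== VERDICT (by name: the statement is the Claim_ definition above) =====
theorem find_joltage_spec : Claim_equal_find_joltage := by
  unfold Claim_equal_find_joltage
  intro s _
  unfold Spec_find_joltage find_joltage find_joltage_alt
  show String.ofList (popEndLoop (findLoopA s.toList ((s.toList.length : Int) - 12) 0).1
      (findLoopA s.toList ((s.toList.length : Int) - 12) 0).2)
    = if PySem.Str.len s ≤ 12 then s else String.ofList (pickChars s.toList 12)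
  by_cases h12 : (s.toList.length : Int) - 12 ≤ 0
  · -- short string: the loops do nothing
    rw [findLoopA, dif_neg (by omega)]
    show String.ofList (popEndLoop s.toList ((s.toList.length : Int) - 12)) = _
    rw [popEnd_eq ((s.toList.length : Int) - 12).toNat _ le_rfl]
    rw [show ((s.toList.length : Int) - 12).toNat = 0 by omega, Nat.sub_zero, List.take_length]
    rw [if_pos (by rw [PySem.Str.len_eq]; omega)]
    exact String.ofList_toList
  · push_neg at h12
    have hb := loopA_bridge (((s.toList.length : Int) - 12).toNat + s.toList.length)
      s.toList [] ((s.toList.length : Int) - 12) (by omega) le_rfl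
    simp only [List.nil_append, List.length_nil] at hb
    rw [hb]
    obtain ⟨hlen, hpick⟩ := fA_main s.toList ((s.toList.length : Int) - 12).toNat
    show String.ofList (popEndLoop (fA s.toList ((s.toList.length : Int) - 12).toNat).1
        (((fA s.toList ((s.toList.length : Int) - 12).toNat).2 : Nat) : Int)) = _
    rw [popEnd_eq (fA s.toList ((s.toList.length : Int) - 12).toNat).2 _ (by simp) _]
    rw [show ((((fA s.toList ((s.toList.length : Int) - 12).toNat).2 : Nat) : Int)).toNat
        = (fA s.toList ((s.toList.length : Int) - 12).toNat).2 by omega]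
    rw [show (fA s.toList ((s.toList.length : Int) - 12).toNat).1.length
          - (fA s.toList ((s.toList.length : Int) - 12).toNat).2
        = s.toList.length - ((s.toList.length : Int) - 12).toNat by omega]
    rw [hpick]
    rw [show s.toList.length - ((s.toList.length : Int) - 12).toNat = 12 by omega]
    rw [if_neg (by rw [PySem.Str.len_eq]; omega)]
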